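-- pv_equiv track=rewrite | github.com/gjkaur/mathematics_for_AI_and_ML | tools/github_math_convert.py | replace_display_math
-- ===== SOURCE A (Python) =====
-- def replace_display_math(md: str) -> str:
--     """Replace $$...$$ outside triple-backtick fences with ```math ... ```."""
--     parts: list[tuple[str, str]] = []
--     pos = 0
--     while True:
--         i = md.find("```", pos)
--         if i == -1:
--             parts.append(("t", md[pos:]))
--             break
--         parts.append(("t", md[pos:i]))
--         j = md.find("```", i + 3)
--         if j == -1:
--             parts.append(("t", md[i:]))
--             break
--         parts.append(("f", md[i : j + 3]))
--         pos = j + 3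
--
--     out: list[str] = []
--     for kind, chunk in parts:
--         if kind == "f":
--             out.append(chunk)
--             continue
--         s = chunk
--         buf: list[str] = []
--         p = 0
--         while p < len(s):
--             a = s.find("$$", p)
--             if a == -1:
--                 buf.append(s[p:])
--                 break
--             buf.append(s[p:a])
--             b = s.find("$$", a + 2)
--             if b == -1:
--                 buf.append(s[a:])
--                 break
--             inner = s[a + 2 : b]
--             buf.append("\n```math\n")
--             buf.append(inner.lstrip("\n"))
--             if not inner.rstrip("\n").endswith("\n"):
--                 buf.append("\n")
--             buf.append("```\n")
--             p = b + 2
--         out.append("".join(buf))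
--     return "".join(out)
-- ===== SOURCE B (Python) =====
-- def replace_display_math(md: str) -> str:
--     """Replace $$...$$ outside triple-backtick fences with ```math ... ```."""
--
--     def subst(text: str) -> str:
--         # split on "$$"; segments pair up as (inner, following-text)
--         segs = text.split("$$")
--         buf = [segs[0]]
--         rest = segs[1:]
--         while len(rest) >= 2:
--             inner, following = rest[0], rest[1]
--             buf.append("\n```math\n" + inner.lstrip("\n") + "\n```\n")
--             buf.append(following)
--             rest = rest[2:]
--         if rest:  # odd leftover: an unpaired trailing "$$" stays as-is
--             buf.append("$$" + rest[0])
--         return "".join(buf)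
--
--     # split on "```"; segments pair up as (fence-body, following-text)
--     segs = md.split("```")
--     out = [subst(segs[0])]
--     rest = segs[1:]
--     while len(rest) >= 2:
--         out.append("```" + rest[0] + "```")  # complete fence, verbatim
--         out.append(subst(rest[1]))
--         rest = rest[2:]
--     if rest:  # unterminated opener: its tail is plain text
--         out.append(subst("```" + rest[0]))
--     return "".join(out)
-- ===== Notes on version B (the rewrite author's own statement) =====
-- stated objective: alternative
-- what changed: A scans with explicit positions via two nested find-loops; B splits the text on the delimiter ("```", then "$$") once and consumes the resulting segments pairwise, exploiting that A's trailing-newline conditional is always true so the replacement block is a fixed template.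
import Mathlib
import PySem

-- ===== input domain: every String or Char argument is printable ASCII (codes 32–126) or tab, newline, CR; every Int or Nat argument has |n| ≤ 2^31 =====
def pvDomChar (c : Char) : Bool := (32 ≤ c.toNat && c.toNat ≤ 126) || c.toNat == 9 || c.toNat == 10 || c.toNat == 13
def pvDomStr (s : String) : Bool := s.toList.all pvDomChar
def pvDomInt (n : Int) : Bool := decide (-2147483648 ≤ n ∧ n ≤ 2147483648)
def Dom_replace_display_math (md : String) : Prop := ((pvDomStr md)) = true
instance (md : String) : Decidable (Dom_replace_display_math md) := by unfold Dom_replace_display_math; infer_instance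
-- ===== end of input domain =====

-- B replaces A's two hand-rolled find/position loops by split-on-delimiter followed by pairwise
-- consumption of the segments (objective: alternative decomposition, similar cost).


-- termination helper cited by the ports' decreasing_by: a found occurrence fits inside the list
theorem pv_find_add_le (s sub : List Char) (h : 0 ≤ PySem.Chars.find s sub) :
    (PySem.Chars.find s sub).toNat + sub.length ≤ s.length := by
  obtain ⟨pre, -⟩ := PySem.Chars.find_spec h
  have h1 := pre.length_le
  have h2 := PySem.Chars.find_le_length (s := s) (sub := sub)
  simp [List.length_drop] at h1
  omega

-- ===== PORT A =====
-- A's inner while-loop over `s` (position p carried as the remaining suffix `s[p:]`;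
-- s.find("$$", p) becomes find on the suffix, the same occurrence).
-- inner.lstrip("\n") is ported by hand as dropWhile (· == '\n') (exact: strip the given char
-- from the left); inner.rstrip("\n") as reverse/dropWhile/reverse (exact).
def substA (s : List Char) : List Char :=
  if s = [] then []             -- while p < len(s)
  else if PySem.Chars.find s ['$', '$'] = -1 then s        -- buf.append(s[p:]); break
  else if PySem.Chars.find (s.drop ((PySem.Chars.find s ['$', '$']).toNat + 2)) ['$', '$'] = -1 then
    -- b == -1: buf holds s[p:a] and s[a:]
    s.take (PySem.Chars.find s ['$', '$']).toNat ++ s.drop (PySem.Chars.find s ['$', '$']).toNat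
  else
    s.take (PySem.Chars.find s ['$', '$']).toNat
      ++ ['\n', '`', '`', '`', 'm', 'a', 't', 'h', '\n']
      ++ ((s.drop ((PySem.Chars.find s ['$', '$']).toNat + 2)).take
            (PySem.Chars.find (s.drop ((PySem.Chars.find s ['$', '$']).toNat + 2)) ['$', '$']).toNat).dropWhile (· == '\n')
      ++ (if !PySem.Chars.endswith
              ((((s.drop ((PySem.Chars.find s ['$', '$']).toNat + 2)).take
                  (PySem.Chars.find (s.drop ((PySem.Chars.find s ['$', '$']).toNat + 2)) ['$', '$']).toNat).reverse.dropWhile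
                  (· == '\n')).reverse) ['\n']
          then ['\n'] else [])
      ++ ['`', '`', '`', '\n']
      ++ substA (s.drop ((PySem.Chars.find s ['$', '$']).toNat + 2
            + (PySem.Chars.find (s.drop ((PySem.Chars.find s ['$', '$']).toNat + 2)) ['$', '$']).toNat + 2))
termination_by s.length
decreasing_by
  have h0 : 0 ≤ PySem.Chars.find s ['$', '$'] := by
    have := PySem.Chars.neg_one_le_find (s := s) (sub := ['$', '$'])
    omega
  have := pv_find_add_le s ['$', '$'] h0
  simp only [List.length_drop, List.length_cons, List.length_nil] at *
  omega

-- A's first while-True loop: the list `parts` (true = "f" fence, false = "t" text), with the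
-- scan position carried as the remaining suffix (md.find("```", pos) = find on the suffix).
def partsA (s : List Char) : List (Bool × List Char) :=
  if PySem.Chars.find s ['`', '`', '`'] = -1 then [(false, s)]   -- ("t", md[pos:]); break
  else if PySem.Chars.find (s.drop ((PySem.Chars.find s ['`', '`', '`']).toNat + 3)) ['`', '`', '`'] = -1 then
    -- j == -1: ("t", md[pos:i]) and ("t", md[i:])
    [(false, s.take (PySem.Chars.find s ['`', '`', '`']).toNat),
     (false, s.drop (PySem.Chars.find s ['`', '`', '`']).toNat)]
  else
    (false, s.take (PySem.Chars.find s ['`', '`', '`']).toNat)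
      :: (true, (s.take ((PySem.Chars.find s ['`', '`', '`']).toNat + 3
            + (PySem.Chars.find (s.drop ((PySem.Chars.find s ['`', '`', '`']).toNat + 3)) ['`', '`', '`']).toNat + 3)).drop
            (PySem.Chars.find s ['`', '`', '`']).toNat)     -- ("f", md[i : j + 3])
      :: partsA (s.drop ((PySem.Chars.find s ['`', '`', '`']).toNat + 3
            + (PySem.Chars.find (s.drop ((PySem.Chars.find s ['`', '`', '`']).toNat + 3)) ['`', '`', '`']).toNat + 3))
termination_by s.length
decreasing_by
  have h0 : 0 ≤ PySem.Chars.find s ['`', '`', '`'] := by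
    have := PySem.Chars.neg_one_le_find (s := s) (sub := ['`', '`', '`'])
    omega
  have := pv_find_add_le s ['`', '`', '`'] h0
  simp only [List.length_drop, List.length_cons, List.length_nil] at *
  omega

-- second loop + "".join
def replace_display_math (md : String) : String :=
  String.ofList (((partsA md.toList).map (fun p => if p.1 then p.2 else substA p.2)).flatten)

-- ===== PORT B =====
-- hand port of Python's text.split(sep) for a non-empty separator (leftmost non-overlapping
-- occurrences, empty pieces kept); the `sep = []` guard only makes the definition total —
-- Source B never splits on the empty string.
def pySplitB (s sep : List Char) : List (List Char) :=
  if sep = [] then [s]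
  else if PySem.Chars.find s sep = -1 then [s]
  else s.take (PySem.Chars.find s sep).toNat
        :: pySplitB (s.drop ((PySem.Chars.find s sep).toNat + sep.length)) sep
termination_by s.length
decreasing_by
  have h0 : 0 ≤ PySem.Chars.find s sep := by
    have := PySem.Chars.neg_one_le_find (s := s) (sub := sep)
    omega
  have := pv_find_add_le s sep h0
  have hsep : 0 < sep.length := by
    cases sep
    · simp_all
    · simp
  simp only [List.length_drop] at *
  omega

-- Source B subst: while len(rest) >= 2 consume (inner, following); odd leftover = unpaired "$$"
def emitMathB : List (List Char) → List Char
  | inner :: following :: rest =>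
      ['\n', '`', '`', '`', 'm', 'a', 't', 'h', '\n'] ++ inner.dropWhile (· == '\n')
        ++ ['\n', '`', '`', '`', '\n'] ++ following ++ emitMathB rest
  | [last] => ['$', '$'] ++ last
  | [] => []

def substB (text : List Char) : List Char :=
  match pySplitB text ['$', '$'] with
  | [] => []            -- unreachable: split never returns an empty list
  | s0 :: rest => s0 ++ emitMathB rest

-- Source B outer pairing: while len(rest) >= 2 consume (fence-body, following-text)
def emitFenceB : List (List Char) → List Char
  | body :: following :: rest =>
      ['`', '`', '`'] ++ body ++ ['`', '`', '`'] ++ substB following ++ emitFenceB rest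
  | [last] => substB (['`', '`', '`'] ++ last)   -- unterminated opener: plain text
  | [] => []

def fenceJoinB (cs : List Char) : List Char :=
  match pySplitB cs ['`', '`', '`'] with
  | [] => []            -- unreachable
  | s0 :: rest => substB s0 ++ emitFenceB rest

def replace_display_math_alt (md : String) : String :=
  String.ofList (fenceJoinB md.toList)

-- ===== PRECONDITION & SPEC =====
def Spec_replace_display_math (md : String) (out : String) : Prop := out = replace_display_math_alt md
instance (md : String) (out : String) : Decidable (Spec_replace_display_math md out) := by unfold Spec_replace_display_math; infer_instance

-- ===== CLAIM (what is proved, stated in full; the proofs are below) =====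
def Claim_equal_replace_display_math : Prop := ∀ (md : String), Dom_replace_display_math md → Spec_replace_display_math md (replace_display_math md)

-- ===== LEMMAS AND PROOFS =====

theorem pv_find_nonneg {s sub : List Char} (h : ¬ PySem.Chars.find s sub = -1) :
    0 ≤ PySem.Chars.find s sub := by
  have := PySem.Chars.neg_one_le_find (s := s) (sub := sub)
  omega

theorem pv_find_nil {sub : List Char} (h : sub ≠ []) : PySem.Chars.find [] sub = -1 := by
  rw [PySem.Chars.find_eq_neg_one_iff]
  intro hinf
  have := hinf.sublist.length_le
  cases sub
  · exact h rfl
  · simp at this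

theorem pv_ne_nil_of_find {s sub : List Char} (hsub : sub ≠ [])
    (h : ¬ PySem.Chars.find s sub = -1) : s ≠ [] := by
  intro hs
  subst hs
  exact h (pv_find_nil hsub)

theorem pv_drop_find (s sub : List Char) (h : 0 ≤ PySem.Chars.find s sub) :
    s.drop (PySem.Chars.find s sub).toNat
      = sub ++ s.drop ((PySem.Chars.find s sub).toNat + sub.length) := by
  obtain ⟨pre, -⟩ := PySem.Chars.find_spec h
  obtain ⟨t, ht⟩ := pre
  have h2 : t = s.drop ((PySem.Chars.find s sub).toNat + sub.length) := by
    have h3 := congrArg (List.drop sub.length) ht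
    rw [List.drop_left, List.drop_drop] at h3
    exact h3
  rw [← h2, ht]

theorem pySplitB_single (s sub : List Char) (hsub : sub ≠ [])
    (h : PySem.Chars.find s sub = -1) : pySplitB s sub = [s] := by
  rw [pySplitB, if_neg hsub, if_pos h]

theorem pySplitB_cons (s sub : List Char) (hsub : sub ≠ [])
    (h : ¬ PySem.Chars.find s sub = -1) :
    pySplitB s sub = s.take (PySem.Chars.find s sub).toNat
      :: pySplitB (s.drop ((PySem.Chars.find s sub).toNat + sub.length)) sub := by
  rw [pySplitB, if_neg hsub, if_neg h]

theorem pySplitB_ne_nil (s sep : List Char) : pySplitB s sep ≠ [] := by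
  rw [pySplitB]
  split_ifs <;> simp

theorem substB_of_split {text s0 : List Char} {rest : List (List Char)}
    (h : pySplitB text ['$', '$'] = s0 :: rest) : substB text = s0 ++ emitMathB rest := by
  rw [substB, h]

theorem fenceJoinB_of_split {cs s0 : List Char} {rest : List (List Char)}
    (h : pySplitB cs ['`', '`', '`'] = s0 :: rest) :
    fenceJoinB cs = substB s0 ++ emitFenceB rest := by
  rw [fenceJoinB, h]

theorem pv_rstrip_no_nl (l : List Char) :
    PySem.Chars.endswith ((l.reverse.dropWhile (· == '\n')).reverse) ['\n'] = false := by
  rw [Bool.eq_false_iff]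
  intro h
  obtain ⟨t, ht⟩ := (PySem.Chars.endswith_iff _ _).mp h
  have h1 : '\n' :: t.reverse = l.reverse.dropWhile (· == '\n') := by
    have := congrArg List.reverse ht
    simpa using this
  have hd := List.head?_dropWhile_not (fun c : Char => c == '\n') l.reverse
  rw [← h1] at hd
  simp at hd

theorem substAB : ∀ n (s : List Char), s.length ≤ n → substA s = substB s := by
  intro n
  induction n with
  | zero =>
    intro s hs
    have hnil : s = [] := by cases s <;> simp_all
    subst hnil
    rw [substA, if_pos rfl, substB_of_split (pySplitB_single [] _ (by simp) (pv_find_nil (by simp)))]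
    simp [emitMathB]
  | succ n ih =>
    intro s hs
    by_cases ha : PySem.Chars.find s ['$', '$'] = -1
    · -- no "$$" at all
      rcases eq_or_ne s [] with hnil | hnil
      · subst hnil
        rw [substA, if_pos rfl,
          substB_of_split (pySplitB_single [] _ (by simp) (pv_find_nil (by simp)))]
        simp [emitMathB]
      · rw [substA, if_neg hnil, if_pos ha,
          substB_of_split (pySplitB_single s _ (by simp) ha)]
        simp [emitMathB]
    · have hnil := pv_ne_nil_of_find (by simp) ha
      have ha0 := pv_find_nonneg ha
      have hpeel1 := pySplitB_cons s ['$', '$'] (by simp) ha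
      norm_num at hpeel1
      have hdropi := pv_drop_find s ['$', '$'] ha0
      norm_num at hdropi
      by_cases hb : PySem.Chars.find (s.drop ((PySem.Chars.find s ['$', '$']).toNat + 2)) ['$', '$'] = -1
      · -- unpaired trailing "$$"
        rw [substA, if_neg hnil, if_neg ha, if_pos hb]
        rw [substB_of_split (by
          rw [hpeel1, pySplitB_single _ _ (by simp) hb])]
        rw [emitMathB]
        rw [hdropi]
        simp
      · have hb0 := pv_find_nonneg hb
        have hpeel2 := pySplitB_cons _ ['$', '$'] (by simp) hb
        norm_num [List.drop_drop] at hpeel2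
        rw [substA, if_neg hnil, if_neg ha, if_neg hb, pv_rstrip_no_nl]
        rcases hrest : pySplitB (s.drop ((PySem.Chars.find s ['$', '$']).toNat + 2
            + ((PySem.Chars.find (s.drop ((PySem.Chars.find s ['$', '$']).toNat + 2)) ['$', '$']).toNat + 2))) ['$', '$']
          with - | ⟨h0, t0⟩
        · exact absurd hrest (pySplitB_ne_nil _ _)
        have hassoc : (PySem.Chars.find s ['$', '$']).toNat + 2
            + ((PySem.Chars.find (s.drop ((PySem.Chars.find s ['$', '$']).toNat + 2)) ['$', '$']).toNat + 2)
            = (PySem.Chars.find s ['$', '$']).toNat + 2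
            + (PySem.Chars.find (s.drop ((PySem.Chars.find s ['$', '$']).toNat + 2)) ['$', '$']).toNat + 2 := by
          omega
        rw [hassoc] at hrest
        rw [substB_of_split (by rw [hpeel1, hpeel2, hassoc, hrest]), emitMathB]
        have htail : substA (s.drop ((PySem.Chars.find s ['$', '$']).toNat + 2
            + (PySem.Chars.find (s.drop ((PySem.Chars.find s ['$', '$']).toNat + 2)) ['$', '$']).toNat + 2))
            = substB (s.drop ((PySem.Chars.find s ['$', '$']).toNat + 2
            + (PySem.Chars.find (s.drop ((PySem.Chars.find s ['$', '$']).toNat + 2)) ['$', '$']).toNat + 2)) := by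
          apply ih
          have hpos : 0 < s.length := List.length_pos_of_ne_nil hnil
          simp only [List.length_drop]
          omega
        rw [htail, substB_of_split hrest]
        simp

theorem fenceAB : ∀ n (cs : List Char), cs.length ≤ n →
    ((partsA cs).map (fun p => if p.1 then p.2 else substA p.2)).flatten = fenceJoinB cs := by
  intro n
  induction n with
  | zero =>
    intro cs hcs
    have hnil : cs = [] := by cases cs <;> simp_all
    subst hnil
    rw [partsA, if_pos (pv_find_nil (by simp)),
      fenceJoinB_of_split (pySplitB_single [] _ (by simp) (pv_find_nil (by simp)))]
    simp [emitFenceB, substAB 0 [] (by simp)]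
  | succ n ih =>
    intro cs hcs
    by_cases ha : PySem.Chars.find cs ['`', '`', '`'] = -1
    · rw [partsA, if_pos ha, fenceJoinB_of_split (pySplitB_single cs _ (by simp) ha)]
      simp [emitFenceB, substAB cs.length cs le_rfl]
    · have ha0 := pv_find_nonneg ha
      have hpeel1 := pySplitB_cons cs ['`', '`', '`'] (by simp) ha
      simp only [List.length_cons, List.length_nil, Nat.reduceAdd] at hpeel1
      have hdropi := pv_drop_find cs ['`', '`', '`'] ha0
      simp only [List.length_cons, List.length_nil, Nat.reduceAdd] at hdropi
      by_cases hb : PySem.Chars.find (cs.drop ((PySem.Chars.find cs ['`', '`', '`']).toNat + 3)) ['`', '`', '`'] = -1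
      · -- unterminated opener: both remaining chunks are text
        rw [partsA, if_neg ha, if_pos hb]
        rw [fenceJoinB_of_split (by rw [hpeel1, pySplitB_single _ _ (by simp) hb])]
        rw [emitFenceB]
        have hpos : 0 < cs.length := List.length_pos_of_ne_nil (pv_ne_nil_of_find (by simp) ha)
        have hle := pv_find_add_le cs ['`', '`', '`'] ha0
        simp only [List.length_cons, List.length_nil, Nat.reduceAdd] at hle
        have e1 := substAB cs.length (cs.take (PySem.Chars.find cs ['`', '`', '`']).toNat)
          (by simp [List.length_take])
        have e2 := substAB cs.length
          (['`', '`', '`'] ++ cs.drop ((PySem.Chars.find cs ['`', '`', '`']).toNat + 3))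
          (by simp only [List.length_append, List.length_drop, List.length_cons, List.length_nil]; omega)
        simp only [List.cons_append, List.nil_append] at e2
        simp [hdropi, e1, e2]
      · have hb0 := pv_find_nonneg hb
        have hpeel2 := pySplitB_cons _ ['`', '`', '`'] (by simp) hb
        simp only [List.length_cons, List.length_nil, Nat.reduceAdd, List.drop_drop] at hpeel2
        rw [partsA, if_neg ha, if_neg hb]
        rcases hrest : pySplitB (cs.drop ((PySem.Chars.find cs ['`', '`', '`']).toNat + 3
            + (PySem.Chars.find (cs.drop ((PySem.Chars.find cs ['`', '`', '`']).toNat + 3)) ['`', '`', '`']).toNat + 3)) ['`', '`', '`']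
          with - | ⟨h0, t0⟩
        · exact absurd hrest (pySplitB_ne_nil _ _)
        have hassoc : (PySem.Chars.find cs ['`', '`', '`']).toNat + 3
            + ((PySem.Chars.find (cs.drop ((PySem.Chars.find cs ['`', '`', '`']).toNat + 3)) ['`', '`', '`']).toNat + 3)
            = (PySem.Chars.find cs ['`', '`', '`']).toNat + 3
            + (PySem.Chars.find (cs.drop ((PySem.Chars.find cs ['`', '`', '`']).toNat + 3)) ['`', '`', '`']).toNat + 3 := by
          omega
        rw [fenceJoinB_of_split (by rw [hpeel1, hpeel2, hassoc, hrest]), emitFenceB]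
        -- the fence chunk md[i : j+3] = ``` ++ inner ++ ```
        have hdropj := pv_drop_find (cs.drop ((PySem.Chars.find cs ['`', '`', '`']).toNat + 3)) ['`', '`', '`'] hb0
        simp only [List.length_cons, List.length_nil, Nat.reduceAdd] at hdropj
        have hmid : (cs.take ((PySem.Chars.find cs ['`', '`', '`']).toNat + 3
              + (PySem.Chars.find (cs.drop ((PySem.Chars.find cs ['`', '`', '`']).toNat + 3)) ['`', '`', '`']).toNat + 3)).drop
              (PySem.Chars.find cs ['`', '`', '`']).toNat
            = ['`', '`', '`'] ++ (cs.drop ((PySem.Chars.find cs ['`', '`', '`']).toNat + 3)).take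
                (PySem.Chars.find (cs.drop ((PySem.Chars.find cs ['`', '`', '`']).toNat + 3)) ['`', '`', '`']).toNat
              ++ ['`', '`', '`'] := by
          rw [List.drop_take]
          have harith : (PySem.Chars.find cs ['`', '`', '`']).toNat + 3
              + (PySem.Chars.find (cs.drop ((PySem.Chars.find cs ['`', '`', '`']).toNat + 3)) ['`', '`', '`']).toNat + 3
              - (PySem.Chars.find cs ['`', '`', '`']).toNat
              = 3 + ((PySem.Chars.find (cs.drop ((PySem.Chars.find cs ['`', '`', '`']).toNat + 3)) ['`', '`', '`']).toNat + 3) := by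
            omega
          rw [harith, hdropi, List.take_add]
          rw [List.take_left' (by norm_num), List.drop_left' (by norm_num)]
          rw [List.take_add, hdropj]
          rw [List.take_left' (by norm_num)]
          simp
        have htail := ih (cs.drop ((PySem.Chars.find cs ['`', '`', '`']).toNat + 3
            + (PySem.Chars.find (cs.drop ((PySem.Chars.find cs ['`', '`', '`']).toNat + 3)) ['`', '`', '`']).toNat + 3)) (by
          have hpos : 0 < cs.length := List.length_pos_of_ne_nil (pv_ne_nil_of_find (by simp) ha)
          simp only [List.length_drop]
          omega)
        rw [fenceJoinB_of_split hrest] at htail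
        simp only [List.map_cons, List.flatten_cons, if_true, if_false, Bool.false_eq_true]
        rw [hmid, htail]
        have hfront := substAB cs.length (cs.take (PySem.Chars.find cs ['`', '`', '`']).toNat)
          (by simp [List.length_take])
        rw [hfront]
        simp

-- ===== VERDICT (by name: the statement is the Claim_ definition above) =====
theorem replace_display_math_spec : Claim_equal_replace_display_math := by
  intro md _
  unfold Spec_replace_display_math replace_display_math replace_display_math_alt
  exact congrArg String.ofList (fenceAB md.toList.length md.toList le_rfl)
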